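-- pv_equiv track=rewrite | github.com/SergTsch87/onix_my_test_task_2021 | Task 1 Translit Run.py | get_sum_letters_in_word
-- ===== SOURCE A (Python) =====
-- def get_sum_letters_in_word(en_word):
--
--     dict_nums_en_letters = {
--         'a': 1, 'b': 2, 'c': 3, 'd': 4, 'e': 5, 'f': 6, 'g': 7, 'h': 8, 'i': 9, 'j': 10, 'k': 11, 'l': 12, 'm': 13, 'n': 14, 'o': 15, 'p': 16, 'q': 17, 'r': 18, 's': 19, 't': 20, 'u': 21, 'v': 22, 'w': 23, 'x': 24, 'y': 25, 'z': 26,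
--         'A': 27, 'B': 28, 'C': 29, 'D': 30, 'E': 31, 'F': 32, 'G': 33, 'H': 34, 'I': 35, 'J': 36, 'K': 37, 'L': 38, 'M': 39, 'N': 40, 'O': 41, 'P': 42, 'Q': 43, 'R': 44, 'S': 45, 'T': 46, 'U': 47, 'V': 48, 'W': 49, 'X': 50, 'Y': 51, 'Z': 52
--     }
--
--     sum = 0
--
--     for char in en_word:
--         sum += int(dict_nums_en_letters[char])
--
--     return sum
-- ===== SOURCE B (Python) =====
-- def get_sum_letters_in_word(en_word):
--     counts = {}
--     for ch in en_word:
--         counts[ch] = counts.get(ch, 0) + 1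
--     letters = 'abcdefghijklmnopqrstuvwxyzABCDEFGHIJKLMNOPQRSTUVWXYZ'
--     return sum((i + 1) * counts.get(ch, 0) for i, ch in enumerate(letters))
-- ===== Notes on version B (the rewrite author's own statement) =====
-- stated objective: alternative
-- what changed: Replaces A's per-character 52-entry table lookup with a two-stage algorithm: one pass builds a frequency histogram of the word, then a dot product over the enumerated alphabet (index+1 times count) yields the sum.
import Mathlib
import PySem

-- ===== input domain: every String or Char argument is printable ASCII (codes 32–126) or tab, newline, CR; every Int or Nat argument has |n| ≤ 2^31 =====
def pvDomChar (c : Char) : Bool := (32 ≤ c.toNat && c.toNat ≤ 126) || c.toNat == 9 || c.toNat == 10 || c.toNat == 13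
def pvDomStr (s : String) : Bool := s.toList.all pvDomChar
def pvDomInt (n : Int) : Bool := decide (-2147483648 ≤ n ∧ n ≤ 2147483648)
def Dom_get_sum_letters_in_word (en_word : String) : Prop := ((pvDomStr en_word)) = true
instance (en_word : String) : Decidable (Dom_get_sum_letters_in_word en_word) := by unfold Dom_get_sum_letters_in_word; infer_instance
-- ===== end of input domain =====

-- B replaces A's per-character table lookup with a two-stage algorithm: build a
-- frequency histogram of the word, then take a dot product over the 52-letter
-- alphabet (value * count). Objective: alternative; same equal sums on all-letter
-- inputs; A's KeyError inputs (any non-letter character) are excluded by Pre_.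

-- ===== PORT A =====
-- A's literal 52-entry dict. The KeyError on a missing key is excluded by Pre_; the
-- port uses getD with default 0 there (never reached inside Pre_).
def pvDictA : PySem.Dict Char Int := PySem.Dict.ofList
  [('a',1),('b',2),('c',3),('d',4),('e',5),('f',6),('g',7),('h',8),('i',9),('j',10),
   ('k',11),('l',12),('m',13),('n',14),('o',15),('p',16),('q',17),('r',18),('s',19),('t',20),
   ('u',21),('v',22),('w',23),('x',24),('y',25),('z',26),
   ('A',27),('B',28),('C',29),('D',30),('E',31),('F',32),('G',33),('H',34),('I',35),('J',36),
   ('K',37),('L',38),('M',39),('N',40),('O',41),('P',42),('Q',43),('R',44),('S',45),('T',46),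
   ('U',47),('V',48),('W',49),('X',50),('Y',51),('Z',52)]

def get_sum_letters_in_word (en_word : String) : Int :=
  en_word.toList.foldl (fun s c => s + pvDictA.getD c 0) 0

-- ===== PORT B =====
-- the alphabet string literal of Source B, as its char list
def pvLettersB : List Char := "abcdefghijklmnopqrstuvwxyzABCDEFGHIJKLMNOPQRSTUVWXYZ".toList

def get_sum_letters_in_word_alt (en_word : String) : Int :=
  -- counts = {}; for ch in en_word: counts[ch] = counts.get(ch, 0) + 1
  let counts : PySem.Dict Char Int :=
    en_word.toList.foldl (fun d ch => d.insert ch (d.getD ch 0 + 1)) PySem.Dict.empty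
  -- sum((i + 1) * counts.get(ch, 0) for i, ch in enumerate(letters))
  ((PySem.List.enumerate pvLettersB).map (fun p => (p.1 + 1) * counts.getD p.2 0)).sum

-- ===== PRECONDITION & SPEC =====
-- Pre_ excludes exactly the inputs on which A raises KeyError: any character that is
-- not an ASCII letter.
def Pre_get_sum_letters_in_word (en_word : String) : Prop :=
  (en_word.toList.all (fun c => pvLettersB.contains c)) = true
instance (en_word : String) : Decidable (Pre_get_sum_letters_in_word en_word) := by
  unfold Pre_get_sum_letters_in_word; infer_instance

def pvWitness_get_sum_letters_in_word : String := "Hello"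

def Spec_get_sum_letters_in_word (en_word : String) (out : Int) : Prop := out = get_sum_letters_in_word_alt en_word
instance (en_word : String) (out : Int) : Decidable (Spec_get_sum_letters_in_word en_word out) := by unfold Spec_get_sum_letters_in_word; infer_instance

-- ===== CLAIM (what is proved, stated in full; the proofs are below) =====
def Claim_equal_get_sum_letters_in_word : Prop := ∀ (en_word : String), Dom_get_sum_letters_in_word en_word → Pre_get_sum_letters_in_word en_word → Spec_get_sum_letters_in_word en_word (get_sum_letters_in_word en_word)


-- ===== LEMMAS AND PROOFS =====

-- splitting the dot product when the word gains one character in front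
theorem pv_sum_split (E : List (Int × Char)) (c : Char) (t : List Char) :
    (E.map (fun p => (p.1 + 1) * (((c :: t).count p.2 : Int)))).sum
      = (E.map (fun p => (p.1 + 1) * ((t.count p.2 : Int)))).sum
        + (E.map (fun p => if p.2 == c then p.1 + 1 else 0)).sum := by
  induction E with
  | nil => simp
  | cons e E ih =>
    simp only [List.map_cons, List.sum_cons, ih]
    by_cases h : e.2 = c
    · simp only [List.count_cons, h, beq_self_eq_true, if_true]
      push_cast; ring
    · have hb : (e.2 == c) = false := beq_eq_false_iff_ne.mpr h
      simp only [List.count_cons, hb]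
      have hcb : (c == e.2) = false := beq_eq_false_iff_ne.mpr (Ne.symm h)
      simp only [hcb]
      push_cast; ring

-- for each letter c, the spike sum over the enumerated alphabet equals A's dict value
set_option maxRecDepth 8000 in
theorem pv_spike_bool :
    (pvLettersB.all (fun c =>
      ((PySem.List.enumerate pvLettersB).map
        (fun p => if p.2 == c then p.1 + 1 else 0)).sum == pvDictA.getD c 0)) = true := by
  decide

theorem pv_spike (c : Char) (hc : c ∈ pvLettersB) :
    ((PySem.List.enumerate pvLettersB).map
      (fun p => if p.2 == c then p.1 + 1 else 0)).sum = pvDictA.getD c 0 := by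
  have h := List.all_eq_true.mp pv_spike_bool c hc
  exact of_decide_eq_true (by simpa using h)

-- A's fold equals the dot product of the alphabet values with the letter counts
theorem pv_fold_eq_dot (l : List Char) (h : ∀ c ∈ l, c ∈ pvLettersB) (acc : Int) :
    l.foldl (fun s c => s + pvDictA.getD c 0) acc
      = acc + ((PySem.List.enumerate pvLettersB).map
                (fun p => (p.1 + 1) * ((l.count p.2 : Int)))).sum := by
  induction l generalizing acc with
  | nil => simp
  | cons c t ih =>
    simp only [List.foldl_cons]
    rw [ih (fun x hx => h x (by simp [hx])), pv_sum_split,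
        pv_spike c (h c (by simp))]
    ring

-- B's histogram lookups are exactly the letter counts
theorem pv_counts_eq (l : List Char) (v : Char) :
    (l.foldl (fun d ch => d.insert ch (d.getD ch 0 + 1))
      (PySem.Dict.empty : PySem.Dict Char Int)).getD v 0 = (l.count v : Int) := by
  rw [PySem.Dict.getD_foldl_insert_add_one]
  simp [PySem.Dict.getD_empty]

-- ===== VERDICT (by name: the statement is the Claim_ definition above) =====
theorem get_sum_letters_in_word_spec : Claim_equal_get_sum_letters_in_word := by
  intro w _ hpre
  have hmem : ∀ c ∈ w.toList, c ∈ pvLettersB := by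
    intro c hc
    have := List.all_eq_true.mp hpre c hc
    simpa using this
  unfold Spec_get_sum_letters_in_word get_sum_letters_in_word get_sum_letters_in_word_alt
  simp only [pv_counts_eq]
  rw [pv_fold_eq_dot _ hmem 0, zero_add]
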